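-- pv_equiv track=rewrite | github.com/jirijanecek77/coding-challenges | src/main/python/advent/year_2025/aoc_01.py | perform_instructions2
-- ===== SOURCE A (Python) =====
-- def perform_instructions2(dial: int, lines: list[str]) -> int:
--     res = 0
--     for instruction in lines:
--         direction = instruction[0]
--         inc = int(instruction[1:])
--
--         res += inc // 100
--         inc %= 100
--         if direction == "L":
--             if dial != 0 and dial - inc <= 0:
--                 res += 1
--             dial = (dial - inc) % 100
--         else:
--             if inc + dial >= 100:
--                 res += 1
--             dial = (dial + inc) % 100
--     return res
-- ===== SOURCE B (Python) =====
-- def perform_instructions2(dial: int, lines: list[str]) -> int: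
--     # Different decomposition: instead of simulating forward with a mutable
--     # (dial, count) state, build -- back to front -- ONE composed continuation
--     # mapping a dial position to the total wraps of all remaining instructions,
--     # then apply it once to the starting dial.  The loop state is a function;
--     # counts flow back up through the composed calls.
--     def extend(rest, s):
--         turns, step = divmod(int(s[1:]), 100)
--         if s[0] == "L":
--             return lambda d: turns + (d != 0 and d - step <= 0) + rest((d - step) % 100)
--         return lambda d: turns + (d + step >= 100) + rest((d + step) % 100)
--     wraps = lambda d: 0
--     for s in reversed(lines):
--         wraps = extend(wraps, s)
--     return wraps(dial)
-- ===== Notes on version B (the rewrite author's own statement) =====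
-- stated objective: alternative
-- what changed: B replaces A's forward simulation over a mutable (dial, count) state by a back-to-front composition: each instruction is parsed once with divmod and folded, from the last line to the first, into a single continuation mapping a dial position to the total wraps of the remaining instructions, which is applied once to the starting dial; counts are summed up through the composed calls instead of accumulated in place.
import Mathlib
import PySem

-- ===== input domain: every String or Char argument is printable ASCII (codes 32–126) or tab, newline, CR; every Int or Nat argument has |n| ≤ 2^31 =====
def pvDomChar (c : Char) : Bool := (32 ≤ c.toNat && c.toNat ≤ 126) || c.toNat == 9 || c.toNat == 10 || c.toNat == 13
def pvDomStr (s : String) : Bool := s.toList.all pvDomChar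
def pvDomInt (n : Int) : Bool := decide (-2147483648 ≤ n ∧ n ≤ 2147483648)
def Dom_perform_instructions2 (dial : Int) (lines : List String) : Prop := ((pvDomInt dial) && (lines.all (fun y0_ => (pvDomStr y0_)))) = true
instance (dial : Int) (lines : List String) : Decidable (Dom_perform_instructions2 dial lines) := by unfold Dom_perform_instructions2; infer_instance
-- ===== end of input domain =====

-- B replaces A's forward mutable-state simulation by a back-to-front fold that
-- composes each instruction into one continuation (dial ↦ total wraps), applied
-- once (objective: alternative, same O(n) cost); returns proved equal on Pre_.

-- ===== PORT A =====
-- state: (res, dial); on a line Python raises on (outside Pre_) the state is kept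
def pvAStep (st : Int × Int) (instruction : String) : Int × Int :=
  match PySem.Str.pyGet? instruction 0,
        PySem.Int.ofStr? (PySem.Str.slice instruction (some 1) none) with
  | some direction, some inc0 =>
    let res := st.1 + PySem.Int.floordiv inc0 100
    let inc := PySem.Int.mod inc0 100
    if direction = 'L' then
      let res := if st.2 ≠ 0 ∧ st.2 - inc ≤ 0 then res + 1 else res
      (res, PySem.Int.mod (st.2 - inc) 100)
    else
      let res := if inc + st.2 ≥ 100 then res + 1 else res
      (res, PySem.Int.mod (st.2 + inc) 100)
  | _, _ => st

def perform_instructions2 (dial : Int) (lines : List String) : Int :=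
  (lines.foldl pvAStep (0, dial)).1

-- ===== PORT B =====
-- extend(rest, s): wrap one instruction around the continuation for the lines
-- after it; on a line Python raises on (outside Pre_) the continuation is kept
def pvExtend (rest : Int → Int) (s : String) : Int → Int :=
  match PySem.Str.pyGet? s 0,
        PySem.Int.ofStr? (PySem.Str.slice s (some 1) none) with
  | some c, some i =>
    match PySem.Int.divmod? i 100 with
    | some (turns, step) =>
      if c = 'L' then
        fun d => turns + (if d ≠ 0 ∧ d - step ≤ 0 then 1 else 0) +
                   rest (PySem.Int.mod (d - step) 100)
      else
        fun d => turns + (if d + step ≥ 100 then 1 else 0) +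
                   rest (PySem.Int.mod (d + step) 100)
    | none => rest
  | _, _ => rest

def perform_instructions2_alt (dial : Int) (lines : List String) : Int :=
  (lines.reverse.foldl pvExtend (fun _ => 0)) dial

-- ===== PRECONDITION & SPEC =====
-- Pre_ excludes exactly the lines on which A raises: an empty line (IndexError on
-- instruction[0]) or a line whose tail is not a Python int literal (ValueError).
def Pre_perform_instructions2 (_dial : Int) (lines : List String) : Prop :=
  ∀ s ∈ lines, (PySem.Str.pyGet? s 0).isSome ∧
    (PySem.Int.ofStr? (PySem.Str.slice s (some 1) none)).isSome
instance (dial : Int) (lines : List String) : Decidable (Pre_perform_instructions2 dial lines) := by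
  unfold Pre_perform_instructions2; infer_instance

def pvWitness_perform_instructions2 : Int × List String := (95, ["R7", "L100", "R-3"])

def Spec_perform_instructions2 (dial : Int) (lines : List String) (out : Int) : Prop := out = perform_instructions2_alt dial lines
instance (dial : Int) (lines : List String) (out : Int) : Decidable (Spec_perform_instructions2 dial lines out) := by unfold Spec_perform_instructions2; infer_instance

-- ===== CLAIM (what is proved, stated in full; the proofs are below) =====
def Claim_equal_perform_instructions2 : Prop := ∀ (dial : Int) (lines : List String), Dom_perform_instructions2 dial lines → Pre_perform_instructions2 dial lines → Spec_perform_instructions2 dial lines (perform_instructions2 dial lines)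

-- ===== LEMMAS AND PROOFS =====

-- A's forward loop from any accumulator equals that accumulator plus the value of
-- B's composed continuation (written as a foldr) at the current dial
lemma pvLoop_agree (ls : List String) : ∀ (res d : Int),
    (∀ s ∈ ls, (PySem.Str.pyGet? s 0).isSome ∧
      (PySem.Int.ofStr? (PySem.Str.slice s (some 1) none)).isSome) →
    (ls.foldl pvAStep (res, d)).1 =
      res + (ls.foldr (fun s rest => pvExtend rest s) (fun _ => 0)) d := by
  induction ls with
  | nil => intro res d _; simp
  | cons s ls ih =>
    intro res d hok
    obtain ⟨⟨h0, h1⟩, hrest⟩ := List.forall_mem_cons.mp hok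
    obtain ⟨c, hc⟩ := Option.isSome_iff_exists.mp h0
    obtain ⟨i, hi⟩ := Option.isSome_iff_exists.mp h1
    have hdm : PySem.Int.divmod? i 100 =
        some (PySem.Int.floordiv i 100, PySem.Int.mod i 100) := by
      simp [PySem.Int.divmod?, PySem.Int.floordiv, PySem.Int.mod]
    simp only [List.foldl_cons, List.foldr_cons]
    set F := List.foldr (fun s rest => pvExtend rest s) (fun _ => (0 : Int)) ls with hF
    simp only [pvAStep, pvExtend, hc, hi, hdm]
    by_cases hL : c = 'L' <;>
      simp only [hL, if_true, if_false] <;> split_ifs <;>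
      rw [ih _ _ hrest] <;> omega

-- ===== VERDICT (by name: the statement is the Claim_ definition above) =====
theorem perform_instructions2_spec : Claim_equal_perform_instructions2 := by
  intro dial lines _ hok
  unfold Spec_perform_instructions2 perform_instructions2 perform_instructions2_alt
  rw [List.foldl_reverse]
  simpa using pvLoop_agree lines 0 dial hok
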